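-- pv_equiv track=rewrite | github.com/davidbrownell/Common_Environment_v2 | Libraries/Python/CommonEnvironment/v1.0/CommonEnvironment/TypeInfo.py | ItemRegularExpressionImpl
-- ===== SOURCE A (Python) =====
-- def ItemRegularExpressionImpl(min, max):
--     patterns = []
--
--     if min < 0 or min == None:
--         patterns.append('-')
--
--         if max > 0 or max == None:
--             patterns.append('?')
--
--     patterns.append('[0-9]')
--
--     if min == None or max == None:
--         patterns.append('+')
--     else:
--         value = 10
--         count = 1
--
--         while True:
--             if min >= -value and max <= value:
--                 break
--
--             value *= 10
--             count += 1
--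
--         patterns.append("{%d}" % count)
--
--     return ''.join(patterns)
-- ===== SOURCE B (Python) =====
-- def ItemRegularExpressionImpl(min, max):
--     prefix = ''
--     if min < 0:
--         prefix = '-?' if max is None or max > 0 else '-'
--     if max is None:
--         return prefix + '[0-9]+'
--     t = max if max >= -min else -min
--     count = 1 if t <= 0 else len(str(t - 1))
--     return prefix + '[0-9]{%d}' % count
-- ===== Notes on version B (the rewrite author's own statement) =====
-- stated objective: simpler
-- what changed: Replaces the while-loop that multiplies by 10 searching for the first power of ten bounding both ends with a closed-form digit count: t = max(max, -min), count = 1 if t <= 0 else len(str(t-1)).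
import Mathlib
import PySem

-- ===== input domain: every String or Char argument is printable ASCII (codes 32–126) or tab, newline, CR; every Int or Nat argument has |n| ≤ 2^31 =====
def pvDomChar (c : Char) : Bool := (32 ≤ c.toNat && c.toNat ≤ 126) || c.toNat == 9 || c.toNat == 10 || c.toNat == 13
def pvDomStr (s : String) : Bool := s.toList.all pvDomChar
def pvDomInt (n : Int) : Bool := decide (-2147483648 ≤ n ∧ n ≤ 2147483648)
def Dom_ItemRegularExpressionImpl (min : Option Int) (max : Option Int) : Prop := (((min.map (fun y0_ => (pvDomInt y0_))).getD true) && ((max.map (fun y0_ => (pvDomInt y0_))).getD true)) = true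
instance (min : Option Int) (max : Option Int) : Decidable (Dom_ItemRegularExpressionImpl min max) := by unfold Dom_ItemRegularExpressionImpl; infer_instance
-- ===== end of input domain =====

-- B replaces A's while-loop power-of-ten search by a closed-form digit count (len(str(t-1))); equally fast, simpler.

-- ===== PORT A =====
-- A's while-loop: value starts at 10, count at 1; multiply by 10 until min >= -value and max <= value.
-- The positivity hypothesis hv only justifies termination; the computation is A's loop step for step.
def pyCountLoopA (m M : Int) (value : Int) (count : Int) : Int :=
  if value ≤ 0 then count  -- totality guard only: A calls this with value = 10 and it only grows
  else if -value ≤ m ∧ M ≤ value then count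
  else pyCountLoopA m M (value * 10) (count + 1)
termination_by (Max.max M (-m) - value).toNat
decreasing_by
  rename_i hv h
  have h1 : value < Max.max M (-m) := by
    rcases not_and_or.mp h with h' | h' <;> simp only [lt_max_iff] <;> omega
  omega

def ItemRegularExpressionImpl (min : Option Int) (max : Option Int) : String :=
  match min, max with
  | none, _ => ""                       -- Python raises TypeError here ('None < 0'); outside Pre_
  | some m, none =>
      if m < 0 then ""                  -- Python raises TypeError here ('None > 0'); outside Pre_
      else "[0-9]+"
  | some m, some M =>
      (if m < 0 then (if 0 < M then "-?" else "-") else "")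
        ++ "[0-9]" ++ "{" ++ PySem.Int.toStr (pyCountLoopA m M 10 1) ++ "}"

-- ===== PORT B =====
def ItemRegularExpressionImpl_alt (min : Option Int) (max : Option Int) : String :=
  match min with
  | none => ""                          -- B raises TypeError here too ('None < 0'); outside Pre_
  | some m =>
      let prefix_ : String :=
        if m < 0 then (match max with | none => "-?" | some M => if 0 < M then "-?" else "-") else ""
      match max with
      | none => prefix_ ++ "[0-9]+"
      | some M =>
          let t : Int := if -m ≤ M then M else -m
          let count : Int := if t ≤ 0 then 1 else PySem.Str.len (PySem.Int.toStr (t - 1))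
          prefix_ ++ "[0-9]{" ++ PySem.Int.toStr count ++ "}"

-- ===== PRECONDITION & SPEC =====
-- Pre_ excludes exactly the inputs where the Python A raises TypeError: min = None, or min < 0 with max = None.
def Pre_ItemRegularExpressionImpl (min : Option Int) (max : Option Int) : Prop :=
  min.isSome = true ∧ (min.getD 0 < 0 → max.isSome = true)
instance (min : Option Int) (max : Option Int) : Decidable (Pre_ItemRegularExpressionImpl min max) := by unfold Pre_ItemRegularExpressionImpl; infer_instance

def pvWitness_ItemRegularExpressionImpl : Option Int × Option Int := (some (-37), some 120)

def Spec_ItemRegularExpressionImpl (min : Option Int) (max : Option Int) (out : String) : Prop := out = ItemRegularExpressionImpl_alt min max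
instance (min : Option Int) (max : Option Int) (out : String) : Decidable (Spec_ItemRegularExpressionImpl min max out) := by unfold Spec_ItemRegularExpressionImpl; infer_instance

-- ===== CLAIM (what is proved, stated in full; the proofs are below) =====
def Claim_equal_ItemRegularExpressionImpl : Prop := ∀ (min : Option Int) (max : Option Int), Dom_ItemRegularExpressionImpl min max → Pre_ItemRegularExpressionImpl min max → Spec_ItemRegularExpressionImpl min max (ItemRegularExpressionImpl min max)

-- ===== LEMMAS AND PROOFS =====

-- Length of Nat.toDigitsCore 10 with empty accumulator, for sufficient fuel.
lemma toDigitsCore_len_log (f : Nat) : ∀ n : Nat, n < f →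
    (Nat.toDigitsCore 10 f n []).length = Nat.log 10 n + 1 := by
  induction f with
  | zero => intro n h; omega
  | succ f ih =>
    intro n h
    rw [Nat.toDigitsCore]
    by_cases h10 : n / 10 = 0
    · have hn : n < 10 := by omega
      simp [h10, Nat.log_eq_zero_iff.mpr (Or.inl hn)]
    · have hn : 10 ≤ n := Nat.le_of_not_lt (fun hlt => h10 (Nat.div_eq_of_lt hlt))
      simp only [h10, if_false]
      rw [Nat.toDigitsCore_lens_eq, ih (n / 10) (by omega),
          Nat.log_div_base, Nat.sub_add_cancel (Nat.succ_le_of_lt (Nat.log_pos (by norm_num) hn))]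

-- Decimal-string length of a nonnegative integer.
lemma toStr_len_eq (x : Int) (hx : 0 ≤ x) :
    PySem.Str.len (PySem.Int.toStr x) = (Nat.log 10 x.toNat + 1 : Nat) := by
  rw [PySem.Str.len_eq, PySem.Int.toList_toStr]
  simp only [PySem.Int.toChars, if_neg (by omega : ¬ x < 0)]
  rw [show Nat.toDigits 10 x.toNat = Nat.toDigitsCore 10 (x.toNat + 1) x.toNat [] from rfl,
      toDigitsCore_len_log _ _ (Nat.lt_succ_self _)]

-- The closed-form count: K t = Nat.log 10 (t-1).toNat + 1.
-- (i) t ≤ 10 ^ K t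
lemma t_le_pow_K (t : Int) : t ≤ 10 ^ (Nat.log 10 (t - 1).toNat + 1) := by
  by_cases h1 : t ≤ 1
  · calc t ≤ 1 := h1
      _ ≤ 10 ^ (Nat.log 10 (t - 1).toNat + 1) := one_le_pow₀ (by norm_num)
  · have hn : (t - 1).toNat = (t - 1) := Int.toNat_of_nonneg (by omega)
    have := Nat.lt_pow_succ_log_self (by norm_num : 1 < 10) (t - 1).toNat
    have : ((t - 1).toNat : Int) < ((10 ^ (Nat.log 10 (t - 1).toNat + 1) : Nat) : Int) := by
      exact_mod_cast this
    push_cast at this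
    omega
-- (ii) for 1 ≤ j < K t, 10 ^ j < t
lemma pow_lt_t (t : Int) (j : Nat) (hj : j < Nat.log 10 (t - 1).toNat + 1) (hj1 : 1 ≤ j) :
    (10 : Int) ^ j < t := by
  have hlog : 1 ≤ Nat.log 10 (t - 1).toNat := by omega
  have hne : (t - 1).toNat ≠ 0 := by
    intro h0; rw [h0] at hlog; simp [Nat.log_zero_right] at hlog
  have ht2 : 2 ≤ t := by omega
  have h1 : (10 : Nat) ^ j ≤ 10 ^ (Nat.log 10 (t - 1).toNat) :=
    Nat.pow_le_pow_right (by norm_num) (by omega)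
  have h2 : (10 : Nat) ^ (Nat.log 10 (t - 1).toNat) ≤ (t - 1).toNat :=
    Nat.pow_log_le_self 10 hne
  have : ((10 : Nat) ^ j : Int) ≤ ((t - 1).toNat : Int) := by exact_mod_cast le_trans h1 h2
  have hn : ((t - 1).toNat : Int) = t - 1 := Int.toNat_of_nonneg (by omega)
  push_cast at this
  omega

-- A's loop started at count c (value = 10^c) returns the closed-form count, for 1 ≤ c ≤ K.
lemma pyCountLoopA_eq (m M : Int) (c : Nat) (hc : 1 ≤ c)
    (hcK : c ≤ Nat.log 10 ((if -m ≤ M then M else -m) - 1).toNat + 1) :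
    pyCountLoopA m M (10 ^ c) c =
      (Nat.log 10 ((if -m ≤ M then M else -m) - 1).toNat + 1 : Nat) := by
  set t : Int := if -m ≤ M then M else -m with ht
  set K : Nat := Nat.log 10 (t - 1).toNat + 1 with hK
  have htm : -m ≤ t := by rw [ht]; split <;> omega
  have htM : M ≤ t := by rw [ht]; split <;> omega
  induction hd : K - c generalizing c with
  | zero =>
    have hcK' : c = K := by omega
    subst hcK'
    have hle := t_le_pow_K t
    rw [← hK] at hle
    have hpos : (0 : Int) < 10 ^ K := by positivity
    rw [pyCountLoopA, if_neg (by omega), if_pos (by constructor <;> omega)]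
  | succ d ih =>
    have hlt : (10 : Int) ^ c < t := pow_lt_t t c (by omega) hc
    have hpos : (0 : Int) < 10 ^ c := by positivity
    rw [pyCountLoopA, if_neg (by omega), if_neg (by intro ⟨h1, h2⟩; omega)]
    have := ih (c + 1) (by omega) (by omega) (by omega)
    convert this using 2

-- The two counts agree.
lemma strcat (p s : String) : p ++ "[0-9]" ++ "{" ++ s ++ "}" = p ++ "[0-9]{" ++ s ++ "}" := by
  have h : ("[0-9]" : String) ++ "{" = "[0-9]{" := by decide
  rw [@String.append_assoc p "[0-9]" "{", h]

lemma counts_eq (m M : Int) :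
    pyCountLoopA m M 10 1 =
      (let t : Int := if -m ≤ M then M else -m
       if t ≤ 0 then 1 else PySem.Str.len (PySem.Int.toStr (t - 1))) := by
  set t : Int := if -m ≤ M then M else -m with ht
  have h := pyCountLoopA_eq m M 1 le_rfl (by omega)
  rw [show ((10 : Int) ^ 1) = 10 by norm_num, Nat.cast_one, ← ht] at h
  simp only [h]
  by_cases h0 : t ≤ 0
  · have : (t - 1).toNat = 0 := by omega
    simp [h0, this, Nat.log_zero_right]
  · rw [if_neg h0, toStr_len_eq (t - 1) (by omega)]

-- ===== VERDICT (by name: the statement is the Claim_ definition above) =====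
theorem ItemRegularExpressionImpl_spec : Claim_equal_ItemRegularExpressionImpl := by
  intro min max _ hpre
  unfold Spec_ItemRegularExpressionImpl
  rcases min with _ | m
  · simp [Pre_ItemRegularExpressionImpl] at hpre
  rcases max with _ | M
  · rcases hpre with ⟨_, h2⟩
    simp only [Option.getD_some] at h2
    have hm : ¬ m < 0 := fun h => by simpa using h2 h
    simp [ItemRegularExpressionImpl, ItemRegularExpressionImpl_alt, hm]
  · simp only [ItemRegularExpressionImpl, ItemRegularExpressionImpl_alt, counts_eq m M]
    exact strcat _ _
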